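-- pv_equiv track=rewrite | github.com/KnotOnPurpose/ParkingFunctions | Ploting.py | orbit_type
-- ===== SOURCE A (Python) =====
-- def orbit_type(arr):
--     """
--     input: arr which is a preference list
--     output: a partition which describes the number of each element in the preference list
--     """
--     counts = {}
--     for i in range(len(arr)):
--         if arr[i] in counts:
--             counts[arr[i]] += 1
--         else:
--             counts[arr[i]] = 1
--
--     partition = list(counts.values())
--     partition.sort()
--     partition.reverse()
--     return tuple(partition)
-- ===== SOURCE B (Python) =====
-- def orbit_type(arr):
--     runs = []
--     cur = None
--     n = 0
--     for x in sorted(arr):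
--         if x == cur:
--             n += 1
--         else:
--             if n:
--                 runs.append(n)
--             cur = x
--             n = 1
--     if n:
--         runs.append(n)
--     runs.sort(reverse=True)
--     return tuple(runs)
-- ===== Notes on version B (the rewrite author's own statement) =====
-- stated objective: alternative
-- what changed: Replaces the dict-counting pass (membership test, then += or initialise) followed by sort-ascending-and-reverse with a sort-then-run-length scan: sort arr, accumulate the length of each maximal run of equal elements, and sort the run lengths descending; it trades hashing for sorting.
import Mathlib
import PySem

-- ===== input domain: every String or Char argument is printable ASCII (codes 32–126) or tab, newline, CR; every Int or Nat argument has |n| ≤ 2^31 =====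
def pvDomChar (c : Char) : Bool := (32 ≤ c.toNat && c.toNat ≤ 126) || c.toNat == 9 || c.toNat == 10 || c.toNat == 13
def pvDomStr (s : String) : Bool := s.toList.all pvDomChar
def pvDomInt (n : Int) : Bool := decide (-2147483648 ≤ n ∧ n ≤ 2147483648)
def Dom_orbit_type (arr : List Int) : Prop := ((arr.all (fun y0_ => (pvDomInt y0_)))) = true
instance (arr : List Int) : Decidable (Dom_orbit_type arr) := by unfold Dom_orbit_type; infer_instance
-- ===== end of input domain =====

-- B replaces A's dict-counting pass by sorting arr and accumulating run lengths of
-- equal elements, then sorting those descending — an alternative algorithm of similar cost.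


-- ===== PORT A =====
-- arr[i] for i in range(len(arr)) is always in range, so pyGetD is exact here.
def orbit_type (arr : List Int) : List Int :=
  (PySem.List.sorted
    ((PySem.List.pyRange 0 (arr.length : Int) 1).foldl
      (fun d i =>
        if d.contains (PySem.List.pyGetD arr i 0) then
          d.modify (PySem.List.pyGetD arr i 0) 0 (· + 1)
        else
          d.insert (PySem.List.pyGetD arr i 0) 1)
      PySem.Dict.empty).values
    (fun v => v) false).reverse

-- ===== PORT B =====
-- the run-length loop of Source B: state (runs, cur, n); 'x == cur' with cur = None is
-- False in Python for ints, which 'some x = none' matches exactly; 'if n:' is n ≠ 0.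
def pvRunsB (s : List Int) : List Int :=
  let st := s.foldl
    (fun (st : List Int × Option Int × Int) x =>
      if some x = st.2.1 then (st.1, st.2.1, st.2.2 + 1)
      else ((if st.2.2 ≠ 0 then st.1 ++ [st.2.2] else st.1), some x, 1))
    ([], none, 0)
  if st.2.2 ≠ 0 then st.1 ++ [st.2.2] else st.1

def orbit_type_alt (arr : List Int) : List Int :=
  PySem.List.sorted (pvRunsB (PySem.List.sorted arr (fun v => v) false)) (fun v => v) true

-- ===== PRECONDITION & SPEC =====
def Spec_orbit_type (arr : List Int) (out : List Int) : Prop := out = orbit_type_alt arr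
instance (arr : List Int) (out : List Int) : Decidable (Spec_orbit_type arr out) := by unfold Spec_orbit_type; infer_instance

-- ===== CLAIM (what is proved, stated in full; the proofs are below) =====
def Claim_equal_orbit_type : Prop := ∀ (arr : List Int), Dom_orbit_type arr → Spec_orbit_type arr (orbit_type arr)

-- ===== LEMMAS AND PROOFS =====

-- recursive specification of the run-length loop
def pvRunsAux (cur : Int) (n : Int) : List Int → List Int
  | [] => [n]
  | y :: ys => if y = cur then pvRunsAux cur (n + 1) ys else n :: pvRunsAux y 1 ys

def pvRuns : List Int → List Int
  | [] => []
  | x :: xs => pvRunsAux x 1 xs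

-- A's loop body is exactly Counter's modify step.
theorem step_eq (d : PySem.Dict Int Int) (x : Int) :
    (if d.contains x then d.modify x 0 (· + 1) else d.insert x 1) = d.modify x 0 (· + 1) := by
  by_cases h : d.contains x
  · simp [h]
  · have h' : ∀ v, (x, v) ∉ d.items := by
      simpa [PySem.Dict.contains] using h
    have hn : List.find? (fun p => (p.1 == x)) d.items = none := by
      rw [List.find?_eq_none]
      intro p hp
      simp only [beq_iff_eq]
      intro he
      exact h' p.2 (by rw [← he]; simpa using hp)
    have hg : d.getD x 0 = 0 := by
      simp [PySem.Dict.getD, PySem.Dict.get?, hn]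
    simp [h, PySem.Dict.modify, PySem.Dict.insert, hg]

theorem foldl_step_eq_counter (arr : List Int) :
    arr.foldl
      (fun d x => if d.contains x then d.modify x 0 (· + 1) else d.insert x 1)
      PySem.Dict.empty = PySem.Dict.counter arr := by
  rw [PySem.Dict.counter_eq_foldl]
  simp only [step_eq]

-- sorting descending is reversing the ascending sort (identity key on Int)
theorem reverse_sorted_eq_sorted_rev (L : List Int) :
    (PySem.List.sorted L (fun v => v) false).reverse
      = PySem.List.sorted L (fun v => v) true := by
  apply PySem.List.eq_of_perm_of_pairwise_le_of_injective (key := fun v : Int => -v)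
    (fun a b h => by simpa using h)
  · exact ((PySem.List.sorted L (fun v => v) false).reverse_perm.trans
      (PySem.List.sorted_perm L (fun v => v) false)).trans
      (PySem.List.sorted_perm L (fun v => v) true).symm
  · exact (PySem.List.sorted_pairwise L (fun v => v)).reverse.imp
      (by intro a b h; simpa using h)
  · exact (PySem.List.sorted_pairwise_rev L (fun v => v)).imp
      (by intro a b h; simpa using h)

theorem sorted_rev_eq_of_perm {L M : List Int} (h : L.Perm M) :
    PySem.List.sorted L (fun v => v) true = PySem.List.sorted M (fun v => v) true := by
  rw [← reverse_sorted_eq_sorted_rev, ← reverse_sorted_eq_sorted_rev,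
    PySem.List.sorted_eq_sorted_of_perm L M (fun v => v) (fun a b hab => hab) h]

-- the foldl of pvRunsB computes pvRunsAux
theorem foldl_runs (l : List Int) (acc : List Int) (cur : Int) (n : Int) (hn : 1 ≤ n) :
    (let st := l.foldl
        (fun (st : List Int × Option Int × Int) x =>
          if some x = st.2.1 then (st.1, st.2.1, st.2.2 + 1)
          else ((if st.2.2 ≠ 0 then st.1 ++ [st.2.2] else st.1), some x, 1))
        (acc, some cur, n);
      if st.2.2 ≠ 0 then st.1 ++ [st.2.2] else st.1) = acc ++ pvRunsAux cur n l := by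
  induction l generalizing acc cur n with
  | nil => simp [pvRunsAux]; omega
  | cons y ys ih =>
      by_cases hy : y = cur
      · subst hy
        simp only [List.foldl_cons, pvRunsAux, if_pos rfl]
        exact ih acc y (n + 1) (by omega)
      · have h1 : ¬ (some y = some cur) := by simpa using hy
        have h2 : n ≠ 0 := by omega
        simp only [List.foldl_cons, if_neg h1, if_pos h2, pvRunsAux, if_neg hy]
        rw [ih (acc ++ [n]) y 1 (by omega), List.append_assoc]
        rfl

theorem pvRunsB_eq (s : List Int) : pvRunsB s = pvRuns s := by
  cases s with
  | nil => rfl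
  | cons x xs =>
      unfold pvRunsB pvRuns
      simp only [List.foldl_cons]
      rw [show (if some x = (none : Option Int) then (([] : List Int), (none : Option Int), (0 : Int) + 1)
          else ((if (0 : Int) ≠ 0 then ([] : List Int) ++ [(0 : Int)] else []), some x, (1 : Int)))
          = (([] : List Int), some x, (1 : Int)) from by simp]
      have := foldl_runs xs [] x 1 (by omega)
      simpa using this

theorem pvRunsAux_replicate (x : Int) (t : List Int) (k : Nat) (n : Int) :
    pvRunsAux x n (List.replicate k x ++ t) = pvRunsAux x (n + k) t := by
  induction k generalizing n with
  | zero => simp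
  | succ m ih =>
      rw [List.replicate_succ, List.cons_append]
      show pvRunsAux x n (x :: _) = _
      rw [pvRunsAux, if_pos rfl, ih]
      congr 1
      push_cast
      ring

theorem pvRunsAux_not_mem (x : Int) (n : Int) (t : List Int) (h : x ∉ t) :
    pvRunsAux x n t = n :: pvRuns t := by
  cases t with
  | nil => rfl
  | cons y ys =>
      have hy : y ≠ x := fun e => h (e ▸ List.mem_cons_self)
      rw [pvRunsAux, if_neg hy]
      rfl

-- a sorted list starting with x is (count x) copies of x followed by a list without x
theorem sorted_head_decomp (x : Int) (xs : List Int) (h : (x :: xs).Pairwise (· ≤ ·)) :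
    ∃ (k : Nat) (t : List Int), x :: xs = List.replicate (k + 1) x ++ t ∧ x ∉ t := by
  induction xs with
  | nil => exact ⟨0, [], by simp, by simp⟩
  | cons y ys ih =>
      by_cases hxy : y = x
      · subst hxy
        have h' : (y :: ys).Pairwise (· ≤ ·) := h.tail
        obtain ⟨k, t, ht, hxt⟩ := ih h'
        exact ⟨k + 1, t, by rw [List.replicate_succ, List.cons_append, ← ht], hxt⟩
      · refine ⟨0, y :: ys, by simp, ?_⟩
        intro hx
        rcases List.mem_cons.mp hx with h1 | h2
        · exact hxy h1.symm
        · have hle1 : x ≤ y := (List.pairwise_cons.mp h).1 y List.mem_cons_self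
          have hle2 : y ≤ x := (List.pairwise_cons.mp h.tail).1 x h2
          exact hxy (le_antisymm hle2 hle1)

theorem runs_perm (N : Nat) : ∀ (s : List Int), s.length ≤ N → s.Pairwise (· ≤ ·) →
    (pvRuns s).Perm ((PySem.Set.ofList s).map (fun y => ((s.count y : Nat) : Int))) := by
  induction N with
  | zero =>
      intro s hlen _
      have hnil : s = [] := List.eq_nil_of_length_eq_zero (Nat.le_zero.mp hlen)
      subst hnil
      simp [pvRuns, PySem.Set.ofList]
  | succ N ih =>
      intro s hlen hs
      cases s with
      | nil => simp [pvRuns, PySem.Set.ofList]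
      | cons x xs =>
          obtain ⟨k, t, hdec, hxt⟩ := sorted_head_decomp x xs hs
          have hsub : t.Sublist (x :: xs) := by
            rw [hdec]; exact List.sublist_append_right _ _
          have hts : t.Pairwise (· ≤ ·) := hs.sublist hsub
          have hlt : t.length ≤ N := by
            have hlen2 : (x :: xs).length = (k + 1) + t.length := by rw [hdec]; simp
            simp only [List.length_cons] at hlen hlen2
            omega
          have iht := ih t hlt hts
          have hr : pvRuns (x :: xs) = ((k : Int) + 1) :: pvRuns t := by
            rw [hdec, List.replicate_succ, List.cons_append]
            show pvRunsAux x 1 (List.replicate k x ++ t) = _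
            rw [pvRunsAux_replicate, pvRunsAux_not_mem x _ t hxt]
            congr 1
            ring
          have hcx : (x :: xs).count x = k + 1 := by
            rw [hdec, List.count_append, List.count_replicate]
            simp [List.count_eq_zero_of_not_mem hxt]
          have hcy : ∀ y ∈ t, (x :: xs).count y = t.count y := by
            intro y hy
            have hyx : ¬ (x = y) := fun e => hxt (e ▸ hy)
            rw [hdec, List.count_append, List.count_replicate]
            simp [hyx]
          have hkeys : (x :: PySem.Set.ofList t).Perm (PySem.Set.ofList (x :: xs)) := by
            rw [List.perm_ext_iff_of_nodup
              (List.nodup_cons.mpr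
                ⟨fun h => hxt ((PySem.Set.mem_ofList t x).mp h), PySem.Set.nodup_ofList t⟩)
              (PySem.Set.nodup_ofList _)]
            intro y
            simp only [List.mem_cons, PySem.Set.mem_ofList, hdec, List.mem_append,
              List.mem_replicate]
            constructor
            · rintro (rfl | hy)
              · exact Or.inl ⟨Nat.succ_ne_zero k, rfl⟩
              · exact Or.inr hy
            · rintro (⟨-, rfl⟩ | hy)
              · exact Or.inl rfl
              · exact Or.inr hy
          rw [hr]
          refine List.Perm.trans (iht.cons ((k : Int) + 1)) ?_
          have hmap : ((k : Int) + 1) :: (PySem.Set.ofList t).map (fun y => ((t.count y : Nat) : Int))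
              = (x :: PySem.Set.ofList t).map (fun y => (((x :: xs).count y : Nat) : Int)) := by
            simp only [List.map_cons]
            congr 1
            · rw [hcx]; push_cast; ring
            · apply List.map_congr_left
              intro y hy
              rw [hcy y ((PySem.Set.mem_ofList t y).mp hy)]
          rw [hmap]
          exact hkeys.map _

-- ===== VERDICT =====
theorem orbit_type_spec : Claim_equal_orbit_type := by
  intro arr _
  unfold Spec_orbit_type orbit_type orbit_type_alt
  rw [PySem.List.foldl_pyRange_zero_pyGetD' arr 0
    (fun (d : PySem.Dict Int Int) (x : Int) =>
      if d.contains x then d.modify x 0 (· + 1) else d.insert x 1)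
    PySem.Dict.empty, foldl_step_eq_counter, reverse_sorted_eq_sorted_rev, pvRunsB_eq]
  have hv : (PySem.Dict.counter arr).values
      = (PySem.Set.ofList arr).map (fun x => ((arr.count x : Nat) : Int)) := by
    show (PySem.Dict.counter arr).items.map (·.2) = _
    rw [PySem.Dict.items_counter]
    simp [List.map_map, Function.comp]
  rw [hv]
  apply sorted_rev_eq_of_perm
  have hsp : (PySem.List.sorted arr (fun v => v) false).Perm arr :=
    PySem.List.sorted_perm arr (fun v => v) false
  have hpair : (PySem.List.sorted arr (fun v => v) false).Pairwise (· ≤ ·) :=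
    PySem.List.sorted_pairwise arr (fun v => v)
  have hperm := runs_perm (PySem.List.sorted arr (fun v => v) false).length
    (PySem.List.sorted arr (fun v => v) false) le_rfl hpair
  refine List.Perm.symm (hperm.trans ?_)
  have hmc : (PySem.Set.ofList (PySem.List.sorted arr (fun v => v) false)).map
        (fun y => (((PySem.List.sorted arr (fun v => v) false).count y : Nat) : Int))
      = (PySem.Set.ofList (PySem.List.sorted arr (fun v => v) false)).map
        (fun y => ((arr.count y : Nat) : Int)) := by
    apply List.map_congr_left
    intro y _
    rw [hsp.count_eq]
  rw [hmc]
  refine List.Perm.map _ ?_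
  rw [List.perm_ext_iff_of_nodup (PySem.Set.nodup_ofList _) (PySem.Set.nodup_ofList _)]
  intro y
  simp [PySem.Set.mem_ofList, PySem.List.mem_sorted]
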